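-- pv_equiv track=rewrite | github.com/AnuragKumarArora/sharedResources | Blockchain/ques2_code.py | form_equations_matrix
-- ===== SOURCE A (Python) =====
-- def form_equations_matrix(x):
--     eq = []
--     for i in range(x):
--         temp = []
--         for j in range(x):
--             temp.append(pow((i+1),(j)))
--         eq.append(temp)
--     return eq
-- ===== SOURCE B (Python) =====
-- def form_equations_matrix(x):
--     # column-major: maintain per-row (row_so_far, current_power) pairs
--     state = [([], 1) for _ in range(x)]
--     for _ in range(x):
--         state = [(row + [cur], cur * (i + 1)) for i, (row, cur) in enumerate(state)]
--     return [row for row, _ in state]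
-- ===== Notes on version B (the rewrite author's own statement) =====
-- stated objective: alternative
-- what changed: Builds the matrix column-by-column, maintaining a running vector of each row's current power (one multiplication per cell) instead of row-by-row calls to pow for every cell.
import Mathlib
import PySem

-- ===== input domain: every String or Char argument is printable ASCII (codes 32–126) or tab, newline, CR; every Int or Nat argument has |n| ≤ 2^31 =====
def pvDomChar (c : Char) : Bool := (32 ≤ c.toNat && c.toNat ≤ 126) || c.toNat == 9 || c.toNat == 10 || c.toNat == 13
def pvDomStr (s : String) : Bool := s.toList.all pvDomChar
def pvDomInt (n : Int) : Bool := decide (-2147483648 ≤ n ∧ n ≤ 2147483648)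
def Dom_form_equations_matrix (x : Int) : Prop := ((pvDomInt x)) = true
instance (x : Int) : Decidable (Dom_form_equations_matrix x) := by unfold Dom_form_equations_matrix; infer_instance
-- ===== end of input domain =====

-- B builds the matrix column-by-column with a running vector of per-row powers instead of
-- row-by-row pow calls; same values, different decomposition.

-- ===== PORT A =====
-- row-major: for i in range(x): temp = []; for j in range(x): temp.append(pow(i+1, j)); eq.append(temp)
def form_equations_matrix (x : Int) : List (List Int) :=
  (PySem.List.pyRange 0 x 1).foldl
    (fun eq i =>
      eq ++ [(PySem.List.pyRange 0 x 1).foldl (fun temp j => temp ++ [(i + 1) ^ j.toNat]) []])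
    []

-- ===== PORT B =====
-- column-major: state of per-row (row_so_far, current_power) pairs, one column appended per step
def form_equations_matrix_alt (x : Int) : List (List Int) :=
  let init : List (List Int × Int) :=
    (PySem.List.pyRange 0 x 1).map (fun _ => (([] : List Int), (1 : Int)))
  let final :=
    (PySem.List.pyRange 0 x 1).foldl
      (fun st _ =>
        (PySem.List.enumerate st 0).map (fun p => (p.2.1 ++ [p.2.2], p.2.2 * (p.1 + 1))))
      init
  final.map (fun p => p.1)

-- ===== PRECONDITION & SPEC =====
def Spec_form_equations_matrix (x : Int) (out : List (List Int)) : Prop := out = form_equations_matrix_alt x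
instance (x : Int) (out : List (List Int)) : Decidable (Spec_form_equations_matrix x out) := by unfold Spec_form_equations_matrix; infer_instance

-- ===== CLAIM (what is proved, stated in full; the proofs are below) =====
def Claim_equal_form_equations_matrix : Prop := ∀ (x : Int), Dom_form_equations_matrix x → Spec_form_equations_matrix x (form_equations_matrix x)

-- ===== LEMMAS AND PROOFS =====

-- foldl that only appends singletons is a map
theorem foldl_push {α β : Type} (f : α → β) :
    ∀ (l : List α) (acc : List β),
      l.foldl (fun a b => a ++ [f b]) acc = acc ++ l.map f := by
  intro l
  induction l with
  | nil => intro acc; simp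
  | cons x xs ih => intro acc; simp [ih]

-- a foldl whose step ignores the element is an iterate
theorem foldl_const_iterate {α β : Type} (g : α → α) :
    ∀ (l : List β) (init : α),
      l.foldl (fun s _ => g s) init = g^[l.length] init := by
  intro l
  induction l with
  | nil => intro init; simp
  | cons x xs ih => intro init; simp [ih, Function.iterate_succ_apply]

-- enumerate of a map over pyRange recovers the range index
theorem enumerate_map_pyRange {α : Type} (f : Int → α) (b : Int) :
    ∀ (a : Int), PySem.List.enumerate ((PySem.List.pyRange a b 1).map f) a
      = (PySem.List.pyRange a b 1).map (fun i => (i, f i)) := by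
  intro a
  by_cases h : a < b
  · rw [PySem.List.pyRange_one_cons h]
    simp only [List.map_cons, PySem.List.enumerate_cons]
    rw [enumerate_map_pyRange f b (a + 1)]
  · rw [PySem.List.pyRange_one_eq_nil (le_of_not_gt h)]
    simp
termination_by a => (b - a).toNat
decreasing_by omega

-- the state after k columns
def colState (x : Int) (k : Nat) : List (List Int × Int) :=
  (PySem.List.pyRange 0 x 1).map
    (fun i => ((List.range k).map (fun j => (i + 1) ^ j), (i + 1) ^ k))

theorem step_colState (x : Int) (k : Nat) :
    (PySem.List.enumerate (colState x k) 0).map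
        (fun p => (p.2.1 ++ [p.2.2], p.2.2 * (p.1 + 1)))
      = colState x (k + 1) := by
  unfold colState
  rw [enumerate_map_pyRange]
  simp only [List.map_map]
  apply List.map_congr_left
  intro i _
  simp [List.range_succ, pow_succ]

theorem iterate_colState (x : Int) :
    ∀ (k : Nat),
      (fun st => (PySem.List.enumerate st 0).map
          (fun p => (p.2.1 ++ [p.2.2], p.2.2 * (p.1 + 1))))^[k] (colState x 0)
        = colState x k := by
  intro k
  induction k with
  | zero => rfl
  | succ n ih => rw [Function.iterate_succ_apply', ih, step_colState]

theorem alt_eq (x : Int) :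
    form_equations_matrix_alt x
      = (PySem.List.pyRange 0 x 1).map
          (fun i => (List.range x.toNat).map (fun j => (i + 1) ^ j)) := by
  unfold form_equations_matrix_alt
  dsimp only
  have hinit : (PySem.List.pyRange 0 x 1).map (fun _ => (([] : List Int), (1 : Int)))
      = colState x 0 := by
    unfold colState; simp
  rw [foldl_const_iterate (g := fun st => (PySem.List.enumerate st 0).map (fun p => (p.2.1 ++ [p.2.2], p.2.2 * (p.1 + 1)))), hinit, iterate_colState, PySem.List.length_pyRange_one]
  unfold colState
  simp

theorem a_eq (x : Int) :
    form_equations_matrix x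
      = (PySem.List.pyRange 0 x 1).map
          (fun i => (List.range x.toNat).map (fun j => (i + 1) ^ j)) := by
  unfold form_equations_matrix
  rw [foldl_push (f := fun i =>
    (PySem.List.pyRange 0 x 1).foldl (fun temp j => temp ++ [(i + 1) ^ j.toNat]) [])]
  simp only [List.nil_append]
  apply List.map_congr_left
  intro i _
  rw [foldl_push (f := fun j : Int => (i + 1) ^ j.toNat)]
  rw [PySem.List.pyRange_one 0 x]
  simp

-- ===== VERDICT (by name: the statement is the Claim_ definition above) =====
theorem form_equations_matrix_spec : Claim_equal_form_equations_matrix := by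
  intro x _
  unfold Spec_form_equations_matrix
  rw [a_eq, alt_eq]
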